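-- pv_equiv track=rewrite | github.com/albertmakan/nft-specific-language | lang/src/spm/sol_dependency_analysers.py | find_dependent_contracts
-- ===== SOURCE A (Python) =====
-- def find_dependent_contracts(sol_data, code):
--   contract_names = find_possible_contract_name(sol_data)
--   dependent_contracts = []
--   for contract_name in contract_names:
--     if "new {0}".format(contract_name) not in code and "{0} ".format(contract_name) not in code:
--       continue
--     dependent_contracts.append(contract_name)
--   return dependent_contracts
--
-- def find_possible_contract_name(sol_data):
--   return list(sol_data.keys())
-- ===== SOURCE B (Python) =====
-- def find_dependent_contracts(sol_data, code):
--     names = list(sol_data.keys())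
--     pats = []
--     for name in names:
--         pats.append((name, "new " + name))
--         pats.append((name, name + " "))
--     byfirst = {}
--     for name, p in pats:
--         byfirst.setdefault(p[0], []).append((name, p))
--     matched = set()
--     for i in range(len(code)):
--         for name, p in byfirst.get(code[i], []):
--             if code.startswith(p, i):
--                 matched.add(name)
--     return [n for n in names if n in matched]
-- ===== Notes on version B (the rewrite author's own statement) =====
-- stated objective: alternative
-- what changed: B indexes the derived patterns ('new '+name, name+' ') in a dict keyed by their first character, then makes a single left-to-right sweep over the code, at each position testing only the patterns whose first character matches via startswith and accumulating the set of matched names, then filters the key list by that set, instead of A's per-name full substring search ('in') over the whole code.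
import Mathlib
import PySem

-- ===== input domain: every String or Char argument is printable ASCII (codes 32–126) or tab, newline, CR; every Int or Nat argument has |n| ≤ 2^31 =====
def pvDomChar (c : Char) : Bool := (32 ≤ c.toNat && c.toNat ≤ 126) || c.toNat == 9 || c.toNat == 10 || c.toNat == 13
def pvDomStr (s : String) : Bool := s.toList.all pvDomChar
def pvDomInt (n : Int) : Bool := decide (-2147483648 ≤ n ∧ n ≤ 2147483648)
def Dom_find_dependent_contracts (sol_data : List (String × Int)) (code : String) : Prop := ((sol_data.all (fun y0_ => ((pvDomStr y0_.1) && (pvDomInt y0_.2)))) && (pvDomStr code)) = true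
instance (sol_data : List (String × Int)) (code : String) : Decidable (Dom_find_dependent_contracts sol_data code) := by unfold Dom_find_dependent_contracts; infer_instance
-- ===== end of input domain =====

-- B makes one left-to-right sweep over the code, testing patterns with startswith at each
-- position and accumulating a set of matched names, instead of A's per-name substring search;
-- objective: alternative (same asymptotic cost, different traversal).

-- ===== PORT A =====
def find_possible_contract_name (sol_data : List (String × Int)) : List String :=
  (PySem.Dict.ofList sol_data).keys

def find_dependent_contracts (sol_data : List (String × Int)) (code : String) : List String :=
  let contract_names := find_possible_contract_name sol_data
  contract_names.foldl (fun dependent_contracts contract_name =>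
    if !(PySem.Str.isIn (String.ofList ("new ".toList ++ contract_name.toList)) code)
        && !(PySem.Str.isIn (String.ofList (contract_name.toList ++ [' '])) code)
    then dependent_contracts
    else dependent_contracts ++ [contract_name]) []

-- ===== PORT B =====
-- the pattern list: for each name, ("new " + name) and (name + " "), tagged with the name
def pvPats (names : List String) : List (String × List Char) :=
  names.foldl (fun (acc : List (String × List Char)) name =>
    (acc ++ [(name, "new ".toList ++ name.toList)]) ++ [(name, name.toList ++ [' '])]) []

-- byfirst.setdefault(p[0], []).append((name, p)) is Dict.modify with default [];
-- p[0] is head?.getD (every pattern is nonempty by construction)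
def pvByFirst (pats : List (String × List Char)) : PySem.Dict Char (List (String × List Char)) :=
  pats.foldl (fun (d : PySem.Dict Char (List (String × List Char))) np =>
    d.modify (np.2.head?.getD ' ') [] (fun l => l ++ [np])) PySem.Dict.empty

def find_dependent_contracts_alt (sol_data : List (String × Int)) (code : String) : List String :=
  let names := (PySem.Dict.ofList sol_data).keys
  let cs := code.toList
  let byfirst := pvByFirst (pvPats names)
  -- code[i] with i drawn from range(len(code)) is in range: cs.getD i ' ' is exact there
  let matched := (List.range cs.length).foldl (fun (m : PySem.Set String) i =>
      (byfirst.getD (cs.getD i ' ') []).foldl (fun (m : PySem.Set String) np =>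
        if PySem.Chars.startswith (cs.drop i) np.2 then m.add np.1 else m) m) PySem.Set.empty
  names.filter (fun n => PySem.Set.contains matched n)

-- ===== PRECONDITION & SPEC =====
def Spec_find_dependent_contracts (sol_data : List (String × Int)) (code : String) (out : List String) : Prop := out = find_dependent_contracts_alt sol_data code
instance (sol_data : List (String × Int)) (code : String) (out : List String) : Decidable (Spec_find_dependent_contracts sol_data code out) := by unfold Spec_find_dependent_contracts; infer_instance

-- ===== CLAIM (what is proved, stated in full; the proofs are below) =====
def Claim_equal_find_dependent_contracts : Prop := ∀ (sol_data : List (String × Int)) (code : String), Dom_find_dependent_contracts sol_data code → Spec_find_dependent_contracts sol_data code (find_dependent_contracts sol_data code)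

-- ===== LEMMAS AND PROOFS =====

-- A's loop ('continue unless a pattern occurs, else append') is a filter.
theorem pv_foldl_skip_if {α : Type} (p : α → Bool) (l : List α) (acc : List α) :
    l.foldl (fun a x => if p x then a else a ++ [x]) acc = acc ++ l.filter (fun x => !p x) := by
  induction l generalizing acc with
  | nil => simp
  | cons y ys ih =>
      by_cases h : p y <;> simp [h, ih]

-- B's pattern list as a flatMap, for membership reasoning
theorem pv_pats_mem (names : List String) (x : String) (p : List Char) :
    (x, p) ∈ pvPats names ↔
      x ∈ names ∧ (p = "new ".toList ++ x.toList ∨ p = x.toList ++ [' ']) := by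
  unfold pvPats
  rw [show (fun (acc : List (String × List Char)) name =>
        (acc ++ [(name, "new ".toList ++ name.toList)]) ++ [(name, name.toList ++ [' '])]) =
      (fun acc name => acc ++ ([(name, "new ".toList ++ name.toList)] ++ [(name, name.toList ++ [' '])]))
    from funext fun a => funext fun n => by simp]
  rw [PySem.List.foldl_append_eq_flatMap]
  simp only [List.nil_append, List.mem_flatMap, List.cons_append, List.nil_append,
    List.mem_cons, List.not_mem_nil, or_false, Prod.mk.injEq]
  constructor
  · rintro ⟨n, hn, ⟨rfl, rfl⟩ | ⟨rfl, rfl⟩⟩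
    · exact ⟨hn, Or.inl rfl⟩
    · exact ⟨hn, Or.inr rfl⟩
  · rintro ⟨hx, rfl | rfl⟩
    · exact ⟨x, hx, Or.inl ⟨rfl, rfl⟩⟩
    · exact ⟨x, hx, Or.inr ⟨rfl, rfl⟩⟩

-- the grouping loop: a bucket holds exactly the patterns with that first character, in order
theorem pv_byFirst_getD (pats : List (String × List Char)) (c : Char) :
    (pvByFirst pats).getD c [] = pats.filter (fun np => np.2.head?.getD ' ' == c) := by
  unfold pvByFirst
  induction pats using List.reverseRecOn with
  | nil => simp
  | append_singleton ys y ih =>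
      rw [List.foldl_append, List.foldl_cons, List.foldl_nil, List.filter_append]
      by_cases h : y.2.head?.getD ' ' = c
      · rw [PySem.Dict.getD_modify, if_pos h.symm, h, ih]
        simp [h]
      · rw [PySem.Dict.getD_modify, if_neg (fun hc => h hc.symm), ih]
        simp [h]

-- membership after B's inner loop over one bucket
theorem pv_inner_mem (c : (String × List Char) → Bool) (L : List (String × List Char))
    (m : PySem.Set String) (x : String) :
    x ∈ L.foldl (fun (m : PySem.Set String) np => if c np then m.add np.1 else m) m ↔
      x ∈ m ∨ ∃ np ∈ L, np.1 = x ∧ c np = true := by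
  induction L generalizing m with
  | nil => simp
  | cons y ys ih =>
      by_cases h : c y
      · simp only [List.foldl_cons, h, if_pos]
        rw [ih]
        simp only [PySem.Set.mem_add, List.mem_cons]
        constructor
        · rintro (⟨hm | rfl⟩ | ⟨np, hnp, hx, hc⟩)
          · exact Or.inl hm
          · exact Or.inr ⟨y, Or.inl rfl, rfl, h⟩
          · exact Or.inr ⟨np, Or.inr hnp, hx, hc⟩
        · rintro (hm | ⟨np, (rfl | hnp), hx, hc⟩)
          · exact Or.inl (Or.inl hm)
          · exact Or.inl (Or.inr hx.symm)
          · exact Or.inr ⟨np, hnp, hx, hc⟩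
      · simp only [List.foldl_cons, h, if_neg, Bool.false_eq_true, not_false_iff]
        rw [ih]
        simp only [List.mem_cons]
        constructor
        · rintro (hm | ⟨np, hnp, hx, hc⟩)
          · exact Or.inl hm
          · exact Or.inr ⟨np, Or.inr hnp, hx, hc⟩
        · rintro (hm | ⟨np, (rfl | hnp), hx, hc⟩)
          · exact Or.inl hm
          · exact absurd hc (by simp [h])
          · exact Or.inr ⟨np, hnp, hx, hc⟩

-- membership after B's outer loop over the positions
theorem pv_outer_mem (c : Nat → (String × List Char) → Bool)
    (bucket : Nat → List (String × List Char)) (L : List Nat) (m : PySem.Set String) (x : String) :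
    x ∈ L.foldl (fun (m : PySem.Set String) i =>
        (bucket i).foldl (fun (m : PySem.Set String) np => if c i np then m.add np.1 else m) m) m ↔
      x ∈ m ∨ ∃ i ∈ L, ∃ np ∈ bucket i, np.1 = x ∧ c i np = true := by
  induction L generalizing m with
  | nil => simp
  | cons j js ih =>
      simp only [List.foldl_cons]
      rw [ih, pv_inner_mem]
      constructor
      · rintro (⟨hm | ⟨np, hnp, hx, hc⟩⟩ | ⟨i, hi, np, hnp, hx, hc⟩)
        · exact Or.inl hm
        · exact Or.inr ⟨j, List.mem_cons_self, np, hnp, hx, hc⟩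
        · exact Or.inr ⟨i, List.mem_cons_of_mem _ hi, np, hnp, hx, hc⟩
      · rintro (hm | ⟨i, hi, np, hnp, hx, hc⟩)
        · exact Or.inl (Or.inl hm)
        · rcases List.mem_cons.mp hi with rfl | hi
          · exact Or.inl (Or.inr ⟨np, hnp, hx, hc⟩)
          · exact Or.inr ⟨i, hi, np, hnp, hx, hc⟩

-- a successful nonempty startswith at position i < length pins down the first character
theorem pv_head_of_startswith (s p : List Char) (i : Nat) (_hi : i < s.length) (hp : p ≠ [])
    (h : PySem.Chars.startswith (s.drop i) p = true) : p.head?.getD ' ' = s.getD i ' ' := by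
  have hpre := (PySem.Chars.startswith_iff _ _).mp h
  rcases p with _ | ⟨a, p'⟩
  · exact absurd rfl hp
  · rcases hpre with ⟨t, ht⟩
    have h1 : (s.drop i).getD 0 ' ' = a := by rw [← ht]; rfl
    have h2 : (s.drop i).getD 0 ' ' = s.getD i ' ' := by
      simp [List.getD, List.getElem?_drop]
    rw [h1] at h2
    simpa using h2

-- a nonempty pattern occurs in s iff it starts at some position < length
theorem pv_isIn_iff_pos (p s : List Char) (hp : p ≠ []) :
    PySem.Chars.isIn p s = true ↔ ∃ i ∈ List.range s.length, PySem.Chars.startswith (s.drop i) p = true := by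
  rw [← PySem.Chars.exists_prefix_drop_iff_isIn]
  constructor
  · rintro ⟨j, hj⟩
    have hjlt : j < s.length := by
      by_contra hge
      have : s.drop j = [] := List.drop_eq_nil_of_le (Nat.le_of_not_lt hge)
      rw [this] at hj
      exact hp (List.prefix_nil.mp hj)
    exact ⟨j, List.mem_range.mpr hjlt, (PySem.Chars.startswith_iff _ _).mpr hj⟩
  · rintro ⟨i, _, hi⟩
    exact ⟨i, (PySem.Chars.startswith_iff _ _).mp hi⟩

-- ===== VERDICT (by name: the statement is the Claim_ definition above) =====
theorem find_dependent_contracts_spec : Claim_equal_find_dependent_contracts := by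
  intro sol_data code _
  unfold Spec_find_dependent_contracts
  unfold find_dependent_contracts find_dependent_contracts_alt find_possible_contract_name
  simp only
  rw [pv_foldl_skip_if, List.nil_append]
  apply List.filter_congr
  intro x hx
  have h1 : ("new ".toList ++ x.toList) ≠ ([] : List Char) := by simp
  have h2 : (x.toList ++ [' ']) ≠ ([] : List Char) := by simp
  rw [Bool.eq_iff_iff, PySem.Set.contains_iff,
    pv_outer_mem (fun i np => PySem.Chars.startswith (code.toList.drop i) np.2)
      (fun i => (pvByFirst (pvPats (PySem.Dict.ofList sol_data).keys)).getD (code.toList.getD i ' ') [])]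
  simp only [PySem.Set.empty, List.not_mem_nil, false_or]
  rw [Bool.not_and, Bool.or_eq_true, Bool.not_not, Bool.not_not,
    PySem.Str.isIn_eq, PySem.Str.isIn_eq]
  simp only [String.toList_ofList]
  rw [pv_isIn_iff_pos _ _ h1, pv_isIn_iff_pos _ _ h2]
  constructor
  · rintro (⟨i, hi, hs⟩ | ⟨i, hi, hs⟩)
    · refine ⟨i, hi, (x, "new ".toList ++ x.toList), ?_, rfl, hs⟩
      rw [pv_byFirst_getD, List.mem_filter]
      refine ⟨(pv_pats_mem _ _ _).mpr ⟨hx, Or.inl rfl⟩, ?_⟩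
      have := pv_head_of_startswith _ _ _ (List.mem_range.mp hi) h1 hs
      simpa using this
    · refine ⟨i, hi, (x, x.toList ++ [' ']), ?_, rfl, hs⟩
      rw [pv_byFirst_getD, List.mem_filter]
      refine ⟨(pv_pats_mem _ _ _).mpr ⟨hx, Or.inr rfl⟩, ?_⟩
      have := pv_head_of_startswith _ _ _ (List.mem_range.mp hi) h2 hs
      simpa using this
  · rintro ⟨i, hi, np, hnp, hxnp, hs⟩
    rw [pv_byFirst_getD, List.mem_filter] at hnp
    obtain ⟨hp, -⟩ := hnp
    obtain ⟨x', p⟩ := np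
    cases hxnp
    rcases (pv_pats_mem _ _ _).mp hp with ⟨-, rfl | rfl⟩
    · exact Or.inl ⟨i, hi, hs⟩
    · exact Or.inr ⟨i, hi, hs⟩
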